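-- pv_equiv track=rewrite | github.com/SurvivingJ/LinguaLoop-web | services/vocabulary_ladder/config.py | next_active_level
-- ===== SOURCE A (Python) =====
-- def next_active_level(current: int, active_levels: list[int]) -> int | None:
--     """Return the next level in active_levels after current, or None if at max."""
--     try:
--         idx = active_levels.index(current)
--         if idx + 1 < len(active_levels):
--             return active_levels[idx + 1]
--     except ValueError:
--         # current not in active_levels — find next above it
--         above = [lv for lv in active_levels if lv > current]
--         if above:
--             return above[0]
--     return None
-- ===== SOURCE B (Python) =====
-- def next_active_level(current, active_levels):
--     """Return the next level in active_levels after current, or None if at max."""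
--     take_next = False
--     first_above = None
--     for lv in active_levels:
--         if take_next:
--             return lv
--         if lv == current:
--             take_next = True
--         elif lv > current and first_above is None:
--             first_above = lv
--     if take_next:
--         return None
--     return first_above
-- ===== Notes on version B (the rewrite author's own statement) =====
-- stated objective: alternative
-- what changed: Replaced the .index()-with-exception two-phase logic (plus a full filtered list build) by a single short-circuiting pass carrying a take_next flag and the first element above current.
import Mathlib
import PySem

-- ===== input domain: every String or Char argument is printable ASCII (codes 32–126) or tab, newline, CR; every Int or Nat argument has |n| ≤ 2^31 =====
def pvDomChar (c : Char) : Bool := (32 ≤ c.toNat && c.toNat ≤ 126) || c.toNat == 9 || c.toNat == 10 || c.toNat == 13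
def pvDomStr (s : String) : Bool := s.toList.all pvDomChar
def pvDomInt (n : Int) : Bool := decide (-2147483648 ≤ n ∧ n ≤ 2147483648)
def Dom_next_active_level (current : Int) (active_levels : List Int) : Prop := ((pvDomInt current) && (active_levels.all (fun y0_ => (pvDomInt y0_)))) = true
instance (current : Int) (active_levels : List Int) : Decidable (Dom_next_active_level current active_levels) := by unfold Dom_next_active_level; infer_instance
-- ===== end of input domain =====

-- B replaces A's .index()/exception two-phase logic (which also builds a filtered list) by one
-- short-circuiting pass carrying a take_next flag and the first element above current (objective: alternative).

-- ===== PORT A =====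
def next_active_level (current : Int) (active_levels : List Int) : Option Int :=
  match PySem.List.index? active_levels current with
  | some idx =>
      -- idx = active_levels.index(current); if idx + 1 < len: return active_levels[idx+1]
      if (idx : Int) + 1 < (active_levels.length : Int) then
        PySem.List.pyGet? active_levels ((idx : Int) + 1)
      else none
  | none =>
      -- ValueError branch: above = [lv for lv in active_levels if lv > current]
      match active_levels.filter (fun lv => current < lv) with
      | [] => none
      | a :: _ => some a

-- ===== PORT B =====
-- the for-loop of Source B: state = (take_next, first_above)
def nalGo (current : Int) : List Int → Bool → Option Int → Option Int
  | [], take_next, first_above => if take_next then none else first_above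
  | lv :: rest, take_next, first_above =>
      if take_next then some lv
      else if lv = current then nalGo current rest true first_above
      else if current < lv ∧ first_above = none then nalGo current rest take_next (some lv)
      else nalGo current rest take_next first_above

def next_active_level_alt (current : Int) (active_levels : List Int) : Option Int :=
  nalGo current active_levels false none

-- ===== PRECONDITION & SPEC =====
def Spec_next_active_level (current : Int) (active_levels : List Int) (out : Option Int) : Prop := out = next_active_level_alt current active_levels
instance (current : Int) (active_levels : List Int) (out : Option Int) : Decidable (Spec_next_active_level current active_levels out) := by unfold Spec_next_active_level; infer_instance

-- ===== CLAIM (what is proved, stated in full; the proofs are below) =====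
def Claim_equal_next_active_level : Prop := ∀ (current : Int) (active_levels : List Int), Dom_next_active_level current active_levels → Spec_next_active_level current active_levels (next_active_level current active_levels)

-- ===== LEMMAS AND PROOFS =====

theorem nalGo_take (current : Int) (xs : List Int) (fa : Option Int) :
    nalGo current xs true fa = xs.head? := by
  cases xs <;> simp [nalGo]

theorem nalGo_false (current : Int) (xs : List Int) (fa : Option Int) :
    nalGo current xs false fa =
      match PySem.List.index? xs current with
      | some idx => xs[idx + 1]?
      | none => fa.or (xs.filter (fun lv => current < lv)).head? := by
  induction xs generalizing fa with
  | nil => simp [nalGo, PySem.List.index?]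
  | cons x rest ih =>
    by_cases hx : x = current
    · subst hx
      rw [PySem.List.index?_cons_self]
      simp [nalGo, nalGo_take, List.head?_eq_getElem?]
    · rw [PySem.List.index?_cons_of_ne _ hx]
      by_cases habove : current < x
      · cases fa with
        | none =>
          have h1 : current < x ∧ (none : Option Int) = none := ⟨habove, rfl⟩
          simp only [nalGo, if_neg hx, ih]
          cases h : PySem.List.index? rest current with
          | some idx => simp
          | none => simp [habove, Option.or]
        | some v =>
          have h2 : ¬(current < x ∧ (some v : Option Int) = none) := by
            rintro ⟨-, hc⟩; exact Option.some_ne_none v hc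
          simp only [nalGo, if_neg hx, if_neg h2, ih]
          cases h : PySem.List.index? rest current with
          | some idx => simp
          | none => simp [Option.or]
      · have h3 : ¬(current < x ∧ fa = none) := by
          rintro ⟨hc, -⟩; exact habove hc
        simp only [nalGo, if_neg hx, if_neg h3, ih]
        cases h : PySem.List.index? rest current with
        | some idx => simp
        | none => simp [habove]

theorem next_active_level_spec : Claim_equal_next_active_level := by
  intro current xs _
  show next_active_level current xs = next_active_level_alt current xs
  unfold next_active_level next_active_level_alt
  rw [nalGo_false]
  cases h : PySem.List.index? xs current with
  | some idx =>
    dsimp only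
    have hlt : idx < xs.length := (PySem.List.getElem_of_index?_eq_some h).1
    by_cases hb : idx + 1 < xs.length
    · rw [if_pos (by exact_mod_cast hb)]
      rw [show ((idx : Int) + 1) = ((idx + 1 : Nat) : Int) by push_cast; ring,
        PySem.List.pyGet?_natCast]
    · rw [if_neg (by omega), List.getElem?_eq_none (by omega)]
  | none =>
    dsimp only
    cases hf : xs.filter (fun lv => current < lv) with
    | nil => simp [Option.or]
    | cons a t => simp [Option.or]
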